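-- pv_equiv track=rewrite | github.com/siwon-lab/CMN | converter/bf_to_cmn_classic.py | bf_to_cmn_classic
-- ===== SOURCE A (Python) =====
-- def bf_to_cmn_classic(code):
--    table = {
--       '>': 'R',
--       '<': 'L',
--       '+': 'U',
--       '-': 'D',
--       '.': 'F',
--       ',': 'B',
--       '[': '(',
--       ']': ')',
--    }
--    result = []
--    for cmd in code:
--       if cmd in table:
--          result.append(table[cmd])
--
--    converted = ' '.join(result)
--    converted = converted.replace('( ', '(').replace(' )', ')')
--    return converted
-- ===== SOURCE B (Python) =====
-- def bf_to_cmn_classic(code):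
--     table = {
--         '>': 'R',
--         '<': 'L',
--         '+': 'U',
--         '-': 'D',
--         '.': 'F',
--         ',': 'B',
--         '[': '(',
--         ']': ')',
--     }
--     out = ''
--     prev = None
--     for cmd in code:
--         tok = table.get(cmd)
--         if tok is None:
--             continue
--         if out and prev != '(' and tok != ')':
--             out += ' '
--         out += tok
--         prev = tok
--     return out
-- ===== Notes on version B (the rewrite author's own statement) =====
-- stated objective: simpler
-- what changed: B emits the output in a single pass, deciding whether to insert a separating space from the previously emitted token, instead of A's join-with-spaces followed by two global replace passes.
import Mathlib
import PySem

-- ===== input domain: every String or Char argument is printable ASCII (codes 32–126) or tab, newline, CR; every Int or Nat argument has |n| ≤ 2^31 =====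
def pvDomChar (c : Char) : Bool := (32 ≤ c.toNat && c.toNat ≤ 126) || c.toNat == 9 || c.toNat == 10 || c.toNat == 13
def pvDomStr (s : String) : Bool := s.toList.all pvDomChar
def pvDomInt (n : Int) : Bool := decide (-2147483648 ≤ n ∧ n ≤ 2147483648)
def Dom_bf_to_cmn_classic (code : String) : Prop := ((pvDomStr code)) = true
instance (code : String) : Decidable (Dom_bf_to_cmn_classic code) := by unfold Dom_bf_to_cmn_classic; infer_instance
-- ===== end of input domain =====

-- B folds A's join-then-two-replaces post-processing into the single mapping pass,
-- tracking the previously emitted token to decide spacing (objective: simpler one-pass build).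

-- the Brainfuck→CMN command table, shared verbatim by both programs
def pvTable : PySem.Dict Char Char :=
  ((((((((PySem.Dict.empty.insert '>' 'R').insert '<' 'L').insert '+' 'U').insert
    '-' 'D').insert '.' 'F').insert ',' 'B').insert '[' '(').insert ']' ')')

-- ===== PORT A =====
def bf_to_cmn_classic (code : String) : String :=
  let result : List String :=
    code.toList.foldl (fun acc cmd =>
      if pvTable.contains cmd then acc ++ [String.ofList [pvTable.getD cmd cmd]] else acc) []
  let converted := PySem.Str.join " " result
  PySem.Str.replace (PySem.Str.replace converted "( " "(") " )" ")"

-- ===== PORT B =====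
def bf_to_cmn_classic_alt (code : String) : String :=
  (code.toList.foldl (fun (st : String × Option Char) cmd =>
      match pvTable.get? cmd with
      | none => st
      | some tok =>
        let out := if st.1 ≠ "" ∧ st.2 ≠ some '(' ∧ tok ≠ ')' then st.1 ++ " " else st.1
        (out ++ String.ofList [tok], some tok)) ("", none)).1

-- ===== PRECONDITION & SPEC =====
def Spec_bf_to_cmn_classic (code : String) (out : String) : Prop := out = bf_to_cmn_classic_alt code
instance (code : String) (out : String) : Decidable (Spec_bf_to_cmn_classic code out) := by unfold Spec_bf_to_cmn_classic; infer_instance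

-- ===== CLAIM (what is proved, stated in full; the proofs are below) =====
def Claim_equal_bf_to_cmn_classic : Prop := ∀ (code : String), Dom_bf_to_cmn_classic code → Spec_bf_to_cmn_classic code (bf_to_cmn_classic code)

-- ===== LEMMAS AND PROOFS =====

-- the table as a plain function
def pvTok? (c : Char) : Option Char :=
  if c = '>' then some 'R' else if c = '<' then some 'L' else if c = '+' then some 'U'
  else if c = '-' then some 'D' else if c = '.' then some 'F' else if c = ',' then some 'B'
  else if c = '[' then some '(' else if c = ']' then some ')' else none

theorem pvTable_get? (c : Char) : pvTable.get? c = pvTok? c := by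
  unfold pvTable pvTok?
  simp only [PySem.Dict.get?_insert]
  split_ifs <;> simp_all [PySem.Dict.get?, PySem.Dict.empty]

theorem pvTable_contains (c : Char) : pvTable.contains c = (pvTok? c).isSome := by
  rw [← pvTable_get?]
  simp only [PySem.Dict.contains, PySem.Dict.get?, Option.isSome_map, List.isSome_find?]

theorem pvTable_getD (c : Char) (v : Char) : pvTable.getD c v = (pvTok? c).getD v := by
  have h := pvTable_get? c
  simp [PySem.Dict.getD, PySem.Dict.get?] at *
  rw [h]

theorem pvTok_ne_space {c t : Char} (h : pvTok? c = some t) : t ≠ ' ' := by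
  unfold pvTok? at h
  split_ifs at h <;> (simp only [Option.some.injEq] at h; subst h; decide)

-- Python str.replace for a non-empty pattern, as a structural recursion
def pvRepl (o1 : Char) (orest new : List Char) : List Char → List Char
  | [] => []
  | c :: t =>
    if (o1 :: orest).isPrefixOf (c :: t) then new ++ pvRepl o1 orest new (t.drop orest.length)
    else c :: pvRepl o1 orest new t
termination_by l => l.length
decreasing_by
  all_goals simp [List.length_drop]

theorem pvRepl_go (o1 : Char) (orest new : List Char) :
    ∀ (fuel : Nat) (l acc : List Char), l.length ≤ fuel →
      PySem.Chars.replace.go (o1 :: orest) new fuel l acc = acc.reverse ++ pvRepl o1 orest new l := by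
  intro fuel
  induction fuel with
  | zero =>
    intro l acc h
    have : l = [] := List.eq_nil_of_length_eq_zero (Nat.le_zero.mp h)
    subst this
    simp [PySem.Chars.replace.go, pvRepl]
  | succ f ih =>
    intro l acc h
    cases l with
    | nil => simp [PySem.Chars.replace.go, pvRepl]
    | cons c t =>
      rw [PySem.Chars.replace.go]
      by_cases hp : (o1 :: orest).isPrefixOf (c :: t) = true
      · rw [if_pos hp]
        have hd : List.drop (o1 :: orest).length (c :: t) = t.drop orest.length := by
          simp [List.drop_succ_cons]
        rw [hd, ih _ _ (by simp_all [List.length_drop]; omega)]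
        rw [pvRepl, if_pos hp]
        simp
      · rw [if_neg hp, ih _ _ (by simp at h; omega)]
        rw [pvRepl, if_neg hp]
        simp

theorem pvReplace_eq (o1 : Char) (orest new s : List Char) :
    PySem.Chars.replace s (o1 :: orest) new = pvRepl o1 orest new s := by
  rw [PySem.Chars.replace]
  simp [pvRepl_go o1 orest new s.length s [] (le_refl _)]

-- the string after the first replace: a space after every token except '('
def pvS1 : List Char → List Char
  | [] => []
  | [t] => [t]
  | t :: u :: rest => if t = '(' then t :: pvS1 (u :: rest) else t :: ' ' :: pvS1 (u :: rest)

-- the final string: a space between tokens t, u except when t = '(' or u = ')'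
def pvS2 : List Char → List Char
  | [] => []
  | [t] => [t]
  | t :: u :: rest => if t = '(' ∨ u = ')' then t :: pvS2 (u :: rest) else t :: ' ' :: pvS2 (u :: rest)

theorem pvStage1 : ∀ (toks : List Char),
    pvRepl '(' [' '] ['('] (PySem.Chars.join [' '] (toks.map (fun t => [t]))) = pvS1 toks := by
  intro toks
  induction toks with
  | nil => simp [PySem.Chars.join_nil, pvRepl, pvS1]
  | cons t rest ih =>
    cases rest with
    | nil =>
      simp only [List.map, PySem.Chars.join_singleton]
      rw [pvRepl]
      have : (['(', ' '].isPrefixOf [t]) = false := by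
        simp [List.isPrefixOf]
      rw [if_neg (by simp [this])]
      rw [pvRepl]
      rfl
    | cons u rest' =>
      simp only [List.map, PySem.Chars.join_cons_cons] at *
      rw [show ([t] ++ [' '] ++ PySem.Chars.join [' '] ([u] :: rest'.map (fun t => [t])))
            = t :: ' ' :: PySem.Chars.join [' '] ([u] :: rest'.map (fun t => [t])) by simp]
      by_cases ht : t = '('
      · subst ht
        rw [pvRepl, if_pos (by simp [List.isPrefixOf])]
        simp only [List.length_cons, List.length_nil, List.drop_succ_cons, List.drop_zero]
        rw [ih, pvS1]
        simp
      · rw [pvRepl, if_neg (by simp [List.isPrefixOf]; intro h; exact ht h.symm)]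
        rw [pvRepl, if_neg (by simp [List.isPrefixOf])]
        rw [ih, pvS1]
        simp [ht]

theorem pvStage2 : ∀ (n : Nat) (toks : List Char), toks.length ≤ n → (∀ t ∈ toks, t ≠ ' ') →
    pvRepl ' ' [')'] [')'] (pvS1 toks) = pvS2 toks ∧
    (toks ≠ [] →
      pvRepl ' ' [')'] [')'] (' ' :: pvS1 toks) =
        (if toks.headI = ')' then [] else [' ']) ++ pvS2 toks) := by
  intro n
  induction n with
  | zero =>
    intro toks h _
    have : toks = [] := List.eq_nil_of_length_eq_zero (Nat.le_zero.mp h)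
    subst this
    exact ⟨by simp [pvS1, pvS2, pvRepl], by simp⟩
  | succ m ih =>
    intro toks hlen hsp
    cases toks with
    | nil => exact ⟨by simp [pvS1, pvS2, pvRepl], by simp⟩
    | cons t rest =>
      have hts : t ≠ ' ' := hsp t (by simp)
      have hL : pvRepl ' ' [')'] [')'] (pvS1 (t :: rest)) = pvS2 (t :: rest) := by
        cases rest with
        | nil =>
          rw [show pvS1 [t] = [t] from rfl]
          rw [pvRepl, if_neg (by simp [List.isPrefixOf])]
          rw [pvRepl]
          rfl
        | cons u rest' =>
          have hih := ih (u :: rest') (by simp at hlen ⊢; omega)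
            (fun x hx => hsp x (by simp [hx]))
          by_cases ht : t = '('
          · rw [show pvS1 (t :: u :: rest') = t :: pvS1 (u :: rest') by rw [pvS1, if_pos ht]]
            rw [pvRepl, if_neg (by simp [List.isPrefixOf]; intro h; exact absurd h.symm (ht ▸ by decide))]
            have : (pvS1 (u :: rest')).drop 0 = pvS1 (u :: rest') := by simp
            rw [show (pvS1 (u :: rest') = pvS1 (u :: rest')) from rfl] at this
            rw [hih.1]
            rw [pvS2, if_pos (Or.inl ht)]
          · rw [show pvS1 (t :: u :: rest') = t :: ' ' :: pvS1 (u :: rest') by rw [pvS1, if_neg ht]]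
            rw [pvRepl, if_neg (by simp [List.isPrefixOf])]
            rw [hih.2 (by simp)]
            have hhead : (u :: rest').headI = u := rfl
            rw [hhead]
            by_cases hu : u = ')'
            · rw [if_pos hu, pvS2, if_pos (Or.inr hu)]
              simp
            · rw [if_neg hu, pvS2, if_neg (by tauto)]
              simp
      refine ⟨hL, ?_⟩
      intro _
      -- M: the stream ' ' :: pvS1 (t :: rest)
      rw [show (t :: rest).headI = t from rfl]
      by_cases ht : t = ')'
      · subst ht
        cases rest with
        | nil =>
          rw [show pvS1 [')'] = [')'] from rfl]
          rw [pvRepl, if_pos (by simp [List.isPrefixOf])]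
          simp [pvRepl, pvS2]
        | cons v rest'' =>
          have hih := ih (v :: rest'') (by simp at hlen ⊢; omega)
            (fun x hx => hsp x (by simp [hx]))
          rw [show pvS1 (')' :: v :: rest'') = ')' :: ' ' :: pvS1 (v :: rest'') by
            rw [pvS1, if_neg (by decide)]]
          rw [pvRepl, if_pos (by simp [List.isPrefixOf])]
          rw [show List.drop [')'].length (')' :: ' ' :: pvS1 (v :: rest'')) = ' ' :: pvS1 (v :: rest'') from rfl]
          rw [hih.2 (by simp)]
          rw [show (v :: rest'').headI = v from rfl]
          rw [show pvS2 (')' :: v :: rest'') = if v = ')' then ')' :: pvS2 (v :: rest'')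
                else ')' :: ' ' :: pvS2 (v :: rest'') by
            by_cases hv : v = ')'
            · rw [pvS2, if_pos (Or.inr hv), if_pos hv]
            · rw [pvS2, if_neg (by simp [hv]), if_neg hv]]
          by_cases hv : v = ')' <;> simp [hv]
      · have hhd : ∃ tl, pvS1 (t :: rest) = t :: tl := by
          cases rest with
          | nil => exact ⟨[], rfl⟩
          | cons u r' =>
            by_cases h : t = '('
            · exact ⟨pvS1 (u :: r'), by rw [pvS1, if_pos h]⟩
            · exact ⟨' ' :: pvS1 (u :: r'), by rw [pvS1, if_neg h]⟩
        obtain ⟨tl, htl⟩ := hhd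
        rw [htl, pvRepl, if_neg (by simp [List.isPrefixOf]; exact fun e => ht e.symm)]
        rw [← htl, hL, if_neg ht]
        rfl

-- A's loop builds exactly the mapped token list
theorem pvFoldA (l : List Char) (acc : List String) :
    l.foldl (fun acc cmd =>
        if pvTable.contains cmd then acc ++ [String.ofList [pvTable.getD cmd cmd]] else acc) acc
      = acc ++ (l.filterMap pvTok?).map (fun t => String.ofList [t]) := by
  rw [show (fun (acc : List String) cmd =>
        if pvTable.contains cmd then acc ++ [String.ofList [pvTable.getD cmd cmd]] else acc)
      = (fun acc cmd => acc ++ ((pvTok? cmd).map (fun t => String.ofList [t])).toList) by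
    funext acc cmd
    cases h : pvTok? cmd <;> simp [pvTable_contains, pvTable_getD, h]]
  induction l generalizing acc with
  | nil => simp
  | cons c t ih =>
    simp only [List.foldl_cons, List.filterMap_cons]
    cases pvTok? c <;> simp [ih]

-- B's loop step on a recognised token
def pvStepB (st : String × Option Char) (tok : Char) : String × Option Char :=
  let out := if st.1 ≠ "" ∧ st.2 ≠ some '(' ∧ tok ≠ ')' then st.1 ++ " " else st.1
  (out ++ String.ofList [tok], some tok)

theorem pvFoldB (l : List Char) (st : String × Option Char) :
    l.foldl (fun st cmd =>
        match pvTable.get? cmd with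
        | none => st
        | some tok =>
          let out := if st.1 ≠ "" ∧ st.2 ≠ some '(' ∧ tok ≠ ')' then st.1 ++ " " else st.1
          (out ++ String.ofList [tok], some tok)) st
      = (l.filterMap pvTok?).foldl pvStepB st := by
  induction l generalizing st with
  | nil => simp
  | cons c t ih =>
    rw [List.foldl_cons, ih]
    cases h : pvTok? c with
    | none =>
      simp only [List.filterMap_cons, h]
      congr 1
      simp [pvTable_get?, h]
    | some tok =>
      simp only [List.filterMap_cons, h, List.foldl_cons]
      congr 1
      simp [pvTable_get?, h, pvStepB]

theorem pvStrEmpty_iff (s : String) : s = "" ↔ s.toList = [] := by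
  rw [← String.toList_inj]; simp

def pvGlue (p : Char) : List Char → List Char
  | [] => []
  | t :: rest => (if p ≠ '(' ∧ t ≠ ')' then [' '] else []) ++ t :: pvGlue t rest

theorem pvGlueFold (toks : List Char) (out : String) (p : Char) (h : out ≠ "") :
    ((toks.foldl pvStepB (out, some p)).1).toList = out.toList ++ pvGlue p toks := by
  induction toks generalizing out p with
  | nil => simp [pvGlue]
  | cons t rest ih =>
    simp only [List.foldl_cons]
    rw [show pvStepB (out, some p) t
          = ((if p ≠ '(' ∧ t ≠ ')' then out ++ " " else out) ++ String.ofList [t], some t) by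
      simp [pvStepB, h]]
    have hne : (if p ≠ '(' ∧ t ≠ ')' then out ++ " " else out) ++ String.ofList [t] ≠ "" := by
      rw [Ne, pvStrEmpty_iff]
      simp [String.toList_append]
    rw [ih _ _ hne]
    rw [pvGlue]
    by_cases hc : p ≠ '(' ∧ t ≠ ')' <;> simp [hc, String.toList_append]

theorem pvGlue_eq_s2 (rest : List Char) (t : Char) : t :: pvGlue t rest = pvS2 (t :: rest) := by
  induction rest generalizing t with
  | nil => rfl
  | cons u rest' ih =>
    rw [pvGlue, pvS2, ← ih u]
    by_cases hc : t = '(' ∨ u = ')'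
    · rw [if_pos hc, if_neg (by tauto)]
      simp
    · rw [if_neg hc, if_pos (by tauto)]
      simp

theorem pvMain (code : String) : bf_to_cmn_classic code = bf_to_cmn_classic_alt code := by
  apply String.toList_inj.mp
  unfold bf_to_cmn_classic bf_to_cmn_classic_alt
  rw [pvFoldA, pvFoldB]
  set toks := code.toList.filterMap pvTok? with htoks
  have hsp : ∀ t ∈ toks, t ≠ ' ' := by
    intro t ht
    rw [htoks] at ht
    obtain ⟨c, _, hc⟩ := List.mem_filterMap.mp ht
    exact pvTok_ne_space hc
  -- left side: join then the two replaces
  rw [PySem.Str.toList_replace, PySem.Str.toList_replace, PySem.Str.toList_join]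
  rw [show ("( " : String).toList = ['(', ' '] from rfl,
      show ("(" : String).toList = ['('] from rfl,
      show (" )" : String).toList = [' ', ')'] from rfl,
      show (")" : String).toList = [')'] from rfl,
      show (" " : String).toList = [' '] from rfl]
  rw [pvReplace_eq, pvReplace_eq]
  simp only [List.nil_append]
  rw [show List.map String.toList (List.map (fun t => String.ofList [t]) toks)
        = toks.map (fun t => [t]) by simp [List.map_map]]
  rw [pvStage1, (pvStage2 toks.length toks (le_refl _) hsp).1]
  -- right side
  cases toks with
  | nil => simp [pvS2]
  | cons t rest =>
    simp only [List.foldl_cons]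
    rw [show pvStepB ("", none) t = ("" ++ String.ofList [t], some t) by simp [pvStepB]]
    rw [pvGlueFold rest ("" ++ String.ofList [t]) t
        (by rw [Ne, pvStrEmpty_iff]; simp)]
    rw [show ("" ++ String.ofList [t]).toList = [t] by simp]
    rw [show ([t] : List Char) ++ pvGlue t rest = t :: pvGlue t rest from rfl]
    rw [pvGlue_eq_s2]

-- ===== VERDICT (by name: the statement is the Claim_ definition above) =====
theorem bf_to_cmn_classic_spec : Claim_equal_bf_to_cmn_classic := by
  intro code _
  unfold Spec_bf_to_cmn_classic
  exact pvMain code
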